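-- pv_equiv track=rewrite | github.com/yyoonsahng/DELTA_CODE | ysKim/week2/2020KAKAO-4.py | av
-- ===== SOURCE A (Python) =====
-- def av(words, queries):
--     available = []
--     for i in range(len(queries)):
--         av1 = []
--         for j in range(len(words)):
--             if len(words[j]) == len(queries[i]):
--                 av1.append(j)
--         available.append(av1)
--     return available
-- ===== SOURCE B (Python) =====
-- def av(words, queries):
--     by_len = {}
--     for j, w in enumerate(words):
--         by_len.setdefault(len(w), []).append(j)
--     return [by_len.get(len(q), []) for q in queries]
-- ===== Notes on version B (the rewrite author's own statement) =====
-- stated objective: faster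
-- what changed: Replaces the per-query scan over all words by a single pass that groups word indices in a dict keyed by length, then answers each query with one dict lookup.
import Mathlib
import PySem

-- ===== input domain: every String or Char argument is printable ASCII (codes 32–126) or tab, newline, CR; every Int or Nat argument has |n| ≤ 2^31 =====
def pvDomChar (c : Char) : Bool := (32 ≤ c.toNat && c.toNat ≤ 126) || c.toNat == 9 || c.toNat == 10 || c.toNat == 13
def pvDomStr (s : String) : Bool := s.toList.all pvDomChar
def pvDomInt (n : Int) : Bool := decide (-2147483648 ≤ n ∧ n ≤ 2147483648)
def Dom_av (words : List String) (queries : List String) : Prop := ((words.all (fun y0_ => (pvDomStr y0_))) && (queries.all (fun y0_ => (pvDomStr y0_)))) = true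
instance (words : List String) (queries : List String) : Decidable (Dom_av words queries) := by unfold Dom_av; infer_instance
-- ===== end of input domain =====

-- B groups word indices by length in one dict pass and answers each query by lookup (asymptotically faster than A's per-query scan).

-- ===== PORT A =====
def av (words : List String) (queries : List String) : List (List Int) :=
  (PySem.List.pyRange 0 (PySem.List.len queries) 1).foldl (fun available i =>
    let av1 : List Int :=
      (PySem.List.pyRange 0 (PySem.List.len words) 1).foldl (fun av1 j =>
        if PySem.Str.len (PySem.List.pyGetD words j "") =
           PySem.Str.len (PySem.List.pyGetD queries i "") then av1 ++ [j] else av1) []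
    available ++ [av1]) []

-- ===== PORT B =====
def av_alt (words : List String) (queries : List String) : List (List Int) :=
  let byLen : PySem.Dict Int (List Int) :=
    (PySem.List.enumerate words).foldl
      (fun d p => d.modify (PySem.Str.len p.2) [] (fun l => l ++ [p.1])) PySem.Dict.empty
  queries.map (fun q => byLen.getD (PySem.Str.len q) [])

-- ===== PRECONDITION & SPEC =====
def Spec_av (words : List String) (queries : List String) (out : List (List Int)) : Prop := out = av_alt words queries
instance (words : List String) (queries : List String) (out : List (List Int)) : Decidable (Spec_av words queries out) := by unfold Spec_av; infer_instance

-- ===== CLAIM (what is proved, stated in full; the proofs are below) =====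
def Claim_equal_av : Prop := ∀ (words : List String) (queries : List String), Dom_av words queries → Spec_av words queries (av words queries)

-- ===== LEMMAS AND PROOFS =====

-- both programs compute, per query q, the indices j of words with len(words[j]) = len(q)
theorem av_eq_canon (words queries : List String) :
    av words queries =
      queries.map (fun q =>
        (PySem.List.pyRange 0 (PySem.List.len words) 1).filter
          (fun j => PySem.Str.len (PySem.List.pyGetD words j "") == PySem.Str.len q)) := by
  unfold av
  rw [PySem.List.foldl_append_singleton_eq_map]
  have h : queries =
      (PySem.List.pyRange 0 (PySem.List.len queries) 1).map (fun i => PySem.List.pyGetD queries i "") := by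
    rw [PySem.List.map_pyGetD_pyRange_zero]
  conv_rhs => rw [h]
  rw [List.map_map]
  simp only [List.nil_append]
  refine List.map_congr_left (fun i _ => ?_)
  rw [PySem.List.foldl_append_ite_eq_filter]
  simp only [List.nil_append]
  refine List.filter_congr (fun j _ => ?_)
  by_cases hmn : (PySem.List.pyGetD words j "").length = (PySem.List.pyGetD queries i "").length <;>
    simp [hmn]

theorem av_alt_eq_canon (words queries : List String) :
    av_alt words queries =
      queries.map (fun q =>
        (PySem.List.pyRange 0 (PySem.List.len words) 1).filter
          (fun j => PySem.Str.len (PySem.List.pyGetD words j "") == PySem.Str.len q)) := by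
  unfold av_alt
  refine List.map_congr_left (fun q _ => ?_)
  have henum : PySem.List.enumerate words 0 =
      (PySem.List.pyRange 0 (PySem.List.len words) 1).map
        (fun j => (j, PySem.List.pyGetD words j "")) :=
    PySem.List.enumerate_eq_map_pyRange (xs := words) ""
  have hshape :
      (PySem.List.enumerate words 0).foldl
        (fun d p => d.modify (PySem.Str.len p.2) [] (fun l => l ++ [p.1]))
        (PySem.Dict.empty : PySem.Dict Int (List Int)) =
      ((PySem.List.enumerate words 0).map
          (fun p => ((PySem.Str.len p.2 : Int), p.1))).foldl
        (fun d p => d.modify p.1 [] (fun l => l ++ [p.2])) PySem.Dict.empty := by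
    rw [List.foldl_map]
  rw [hshape, PySem.Dict.getD_foldl_modify_append, PySem.Dict.getD_empty]
  rw [henum, List.map_map, List.filter_map, List.map_map]
  simp [Function.comp_def]

-- ===== VERDICT (by name: the statement is the Claim_ definition above) =====
theorem av_spec : Claim_equal_av := by
  intro words queries _
  unfold Spec_av
  rw [av_eq_canon, av_alt_eq_canon]
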